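-- pv_equiv track=rewrite | github.com/kylevedder/BucketedSceneFlowEval | scripts/av2_eval.py | _make_shards
-- ===== SOURCE A (Python) =====
-- def _make_shards(total_len: int, num_shards: int) -> list[tuple[int, int]]:
--     """
--     Return a list of tuples of (start, end) indices for each shard.
--
--     The function divides the range specified by total_len into num_shards shards.
--     Each shard is represented by a tuple of (start, end) indices.
--     The division tries to distribute the elements as evenly as possible among the shards.
--     """
--     shards = []
--     shard_len = total_len // num_shards
--     remainder = total_len % num_shards
--
--     start = 0
--     for _ in range(num_shards):
--         end = start + shard_len + (1 if remainder > 0 else 0)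
--         shards.append((start, min(end, total_len)))
--         start = end
--         remainder -= 1
--
--     return shards
-- ===== SOURCE B (Python) =====
-- def _make_shards(total_len: int, num_shards: int) -> list[tuple[int, int]]:
--     shard_len = total_len // num_shards
--     remainder = total_len % num_shards
--     return [
--         (i * shard_len + min(i, remainder),
--          min((i + 1) * shard_len + min(i + 1, remainder), total_len))
--         for i in range(num_shards)
--     ]
-- ===== Notes on version B (the rewrite author's own statement) =====
-- stated objective: simpler
-- what changed: Replaced the stateful loop threading start/remainder across iterations by a closed-form comprehension computing each shard's boundaries independently as i*shard_len + min(i, remainder).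
-- outside the precondition, e.g. on _make_shards(10, 0): A raises ZeroDivisionError, B raises ZeroDivisionError
import Mathlib
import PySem

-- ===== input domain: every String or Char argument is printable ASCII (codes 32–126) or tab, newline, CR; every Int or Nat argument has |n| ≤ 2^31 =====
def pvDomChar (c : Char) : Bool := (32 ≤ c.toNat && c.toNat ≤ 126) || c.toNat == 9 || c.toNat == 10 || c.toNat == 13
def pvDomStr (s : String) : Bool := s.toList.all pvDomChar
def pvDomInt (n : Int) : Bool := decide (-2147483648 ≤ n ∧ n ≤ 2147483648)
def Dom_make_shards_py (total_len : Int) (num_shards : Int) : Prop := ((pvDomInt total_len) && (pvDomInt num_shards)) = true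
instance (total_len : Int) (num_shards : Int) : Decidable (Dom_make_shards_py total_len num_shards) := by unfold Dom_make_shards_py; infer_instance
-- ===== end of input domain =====

-- B replaces A's stateful loop (threading start/remainder) by a closed-form
-- per-shard formula in a comprehension; objective: simpler.

-- ===== PORT A =====
def make_shards_py (total_len : Int) (num_shards : Int) : List (Int × Int) :=
  let shard_len := PySem.Int.floordiv total_len num_shards
  let remainder0 := PySem.Int.mod total_len num_shards
  let res := (PySem.List.pyRange 0 num_shards 1).foldl
    (fun st _ =>
      let start := st.2.1
      let remainder := st.2.2
      let e := start + shard_len + (if remainder > 0 then (1:Int) else 0)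
      (st.1 ++ [(start, min e total_len)], e, remainder - 1))
    (([] : List (Int × Int)), 0, remainder0)
  res.1

-- ===== PORT B =====
def make_shards_py_alt (total_len : Int) (num_shards : Int) : List (Int × Int) :=
  let shard_len := PySem.Int.floordiv total_len num_shards
  let remainder := PySem.Int.mod total_len num_shards
  (PySem.List.pyRange 0 num_shards 1).map
    (fun i => (i * shard_len + min i remainder,
               min ((i + 1) * shard_len + min (i + 1) remainder) total_len))

-- ===== PRECONDITION & SPEC =====
-- Pre_ excludes exactly num_shards = 0, where Python A raises ZeroDivisionError.
def Pre_make_shards_py (total_len : Int) (num_shards : Int) : Prop := num_shards ≠ 0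
instance (total_len : Int) (num_shards : Int) : Decidable (Pre_make_shards_py total_len num_shards) := by unfold Pre_make_shards_py; infer_instance
def pvWitness_make_shards_py : Int × Int := (10, 3)

def Spec_make_shards_py (total_len : Int) (num_shards : Int) (out : List (Int × Int)) : Prop := out = make_shards_py_alt total_len num_shards
instance (total_len : Int) (num_shards : Int) (out : List (Int × Int)) : Decidable (Spec_make_shards_py total_len num_shards out) := by unfold Spec_make_shards_py; infer_instance

-- ===== CLAIM (what is proved, stated in full; the proofs are below) =====
def Claim_equal_make_shards_py : Prop := ∀ (total_len : Int) (num_shards : Int), Dom_make_shards_py total_len num_shards → Pre_make_shards_py total_len num_shards → Spec_make_shards_py total_len num_shards (make_shards_py total_len num_shards)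

-- ===== LEMMAS AND PROOFS =====

-- shifting a map over List.range by one
theorem pv_range_shift {α : Type} (F : Int → α) (k : Int) (n : Nat) :
    (List.range (n+1)).map (fun (j : Nat) => F (k + (j:Int))) =
      F k :: (List.range n).map (fun (j : Nat) => F ((k+1) + (j:Int))) := by
  rw [List.range_succ_eq_map, List.map_cons, List.map_map]
  simp only [Nat.cast_zero, add_zero, List.cons.injEq, true_and]
  apply List.map_congr_left
  intro j _
  simp only [Function.comp]
  congr 1
  push_cast
  ring

-- the loop invariant of A's fold, stated for a fold over any index list
theorem pv_loopA (tl sl r : Int) (hr : 0 ≤ r) :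
    ∀ (l : List Int) (k : Int) (acc : List (Int × Int)),
      l.foldl
        (fun st _ =>
          let start := st.2.1
          let remainder := st.2.2
          let e := start + sl + (if remainder > 0 then (1:Int) else 0)
          (st.1 ++ [(start, min e tl)], e, remainder - 1))
        (acc, k * sl + min k r, r - k)
      = (acc ++ (List.range l.length).map
            (fun (j : Nat) => ((k + (j:Int)) * sl + min (k + (j:Int)) r,
              min ((k + (j:Int) + 1) * sl + min (k + (j:Int) + 1) r) tl)),
          (k + l.length) * sl + min (k + (l.length:Int)) r, r - (k + l.length)) := by
  intro l
  induction l with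
  | nil => intro k acc; simp
  | cons x xs ih =>
    intro k acc
    simp only [List.foldl_cons]
    have hmin : min k r + (if r - k > 0 then (1:Int) else 0) = min (k+1) r := by
      split_ifs <;> omega
    have hE : k * sl + min k r + sl + (if r - k > 0 then (1:Int) else 0)
        = (k+1) * sl + min (k+1) r := by
      rw [← hmin]; ring
    rw [hE, show r - k - 1 = r - (k+1) from by ring,
        ih (k+1) (acc ++ [(k * sl + min k r, min ((k+1) * sl + min (k+1) r) tl)])]
    simp only [List.length_cons, Prod.mk.injEq]
    refine ⟨?_, by push_cast; ring_nf, by push_cast; ring_nf⟩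
    rw [pv_range_shift (fun m => (m * sl + min m r, min ((m + 1) * sl + min (m + 1) r) tl)) k xs.length]
    simp

-- ===== VERDICT (by name: the statement is the Claim_ definition above) =====
theorem make_shards_py_spec : Claim_equal_make_shards_py := by
  intro tl ns _ hpre
  unfold Spec_make_shards_py
  simp only [make_shards_py, make_shards_py_alt]
  by_cases hns : 0 < ns
  · have hr : 0 ≤ PySem.Int.mod tl ns := by
      rw [PySem.Int.mod_eq_emod_of_pos hns]
      exact Int.emod_nonneg tl (by omega)
    have h0 : (0:Int) * (PySem.Int.floordiv tl ns) + min 0 (PySem.Int.mod tl ns)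
        = 0 := by rw [zero_mul, zero_add]; omega
    have key := pv_loopA tl (PySem.Int.floordiv tl ns) (PySem.Int.mod tl ns) hr
        (PySem.List.pyRange 0 ns 1) 0 []
    rw [h0, sub_zero] at key
    rw [key]
    simp only [List.nil_append]
    rw [PySem.List.pyRange_one 0 ns, List.map_map]
    simp only [List.length_map, List.length_range]
    apply List.map_congr_left
    intro j _
    simp [Function.comp]
  · rw [PySem.List.pyRange_one_eq_nil (by omega)]
    simp
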